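-- pv_equiv track=rewrite | github.com/0z4ck/zeta_zero | moves.py | bishop
-- ===== SOURCE A (Python) =====
-- def bishop(x, y, horse=False):
--         move_list = []
--         leftback = []
--         rightback = []
--         leftfront = []
--         rightfront = []
--         for i in range(1,9):
--             if x+i < 9 and y+i < 9:
--                 leftback.append((x+i,y+i))
--             if x-i >= 0 and y+i < 9:
--                 rightback.append((x-i,y+i))
--             if x+i < 9 and y-i >= 0:
--                 leftfront.append((x+i,y-i))
--             if x-i >= 0 and y-i >= 0:
--                 rightfront.append((x-i,y-i))
--         for movepart in [leftback,rightback,leftfront,rightfront]: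
--             move_list.append(movepart)
--
--         if horse:
--             im = [(x,y+1),(x,y-1),(x+1,y),(x-1,y)]
--             if x==8:
--                 for i in ((x+1,y),):
--                     try:
--                         im.remove(i)
--                     except:
--                         pass
--             if y==8:
--                 for i in ((x,y+1),):
--                     try:
--                         im.remove(i)
--                     except:
--                         pass
--             if x==0:
--                 for i in ((x-1,y),):
--                     try:
--                         im.remove(i)
--                     except:
--                         pass
--             if y==0:
--                 for i in (((x,y-1)),):
--                     try:
--                         im.remove(i)
--                     except:
--                         pass
--             move_list.append(im)
--         return move_list
-- ===== SOURCE B (Python) =====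
-- def bishop(x, y, horse=False):
--     # A square passes the board test iff each coordinate that grew past the
--     # center is < 9 and each that shrank is >= 0.
--     def ok(c, c0):
--         return c < 9 if c > c0 else c >= 0
--
--     # One symmetric sweep j = -8..8 over a whole diagonal through (x, y);
--     # the point at offset j is (x + j, y + sy * j).  Positive offsets give the
--     # outward-ordered forward half; negative offsets are collected in sweep
--     # order and reversed to get the outward-ordered backward half.
--     def diagonal(sy):
--         neg, pos = [], []
--         for j in range(-8, 9):
--             if j == 0:
--                 continue
--             p = (x + j, y + sy * j)
--             if ok(p[0], x) and ok(p[1], y):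
--                 (pos if j > 0 else neg).append(p)
--         return pos, neg[::-1]
--
--     leftback, rightfront = diagonal(1)
--     leftfront, rightback = diagonal(-1)
--     move_list = [leftback, rightback, leftfront, rightfront]
--
--     if horse:
--         steps = [(0, 1), (0, -1), (1, 0), (-1, 0)]
--         move_list.append([(x + dx, y + dy) for dx, dy in steps
--                           if not (dx == 1 and x == 8 or dx == -1 and x == 0
--                                   or dy == 1 and y == 8 or dy == -1 and y == 0)])
--     return move_list
-- ===== Notes on version B (the rewrite author's own statement) =====
-- stated objective: alternative
-- what changed: Instead of one i=1..8 loop filling four direction buckets with four separate guards, B sweeps each full diagonal once with signed offsets j=-8..8 under a single sign-aware board test, taking the forward half in sweep order and reversing the backward half; the horse block's try/remove edge surgery becomes an edge-condition comprehension over the four unit steps.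
import Mathlib
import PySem

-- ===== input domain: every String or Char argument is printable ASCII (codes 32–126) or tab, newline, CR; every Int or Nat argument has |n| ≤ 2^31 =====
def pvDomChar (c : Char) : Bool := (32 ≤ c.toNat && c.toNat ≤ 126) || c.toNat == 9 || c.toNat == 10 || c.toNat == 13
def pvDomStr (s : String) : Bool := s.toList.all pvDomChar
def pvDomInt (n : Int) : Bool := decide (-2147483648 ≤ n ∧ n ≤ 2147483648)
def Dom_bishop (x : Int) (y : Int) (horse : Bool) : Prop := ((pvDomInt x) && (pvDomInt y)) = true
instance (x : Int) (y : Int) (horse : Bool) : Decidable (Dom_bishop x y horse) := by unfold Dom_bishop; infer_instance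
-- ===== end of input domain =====

-- B replaces A's single 1..8 loop with four guarded buckets by one signed sweep -8..8
-- per full diagonal (forward half kept, backward half reversed) and the horse block's
-- try/remove surgery by an edge-condition comprehension; objective: alternative.

-- ===== PORT A =====
def bishop (x : Int) (y : Int) (horse : Bool) : List (List (Int × Int)) :=
  let st := (PySem.List.pyRange 1 9 1).foldl
    (fun (st : List (Int × Int) × List (Int × Int) × List (Int × Int) × List (Int × Int)) i =>
      (if x + i < 9 ∧ y + i < 9 then st.1 ++ [(x + i, y + i)] else st.1,
       if x - i ≥ 0 ∧ y + i < 9 then st.2.1 ++ [(x - i, y + i)] else st.2.1,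
       if x + i < 9 ∧ y - i ≥ 0 then st.2.2.1 ++ [(x + i, y - i)] else st.2.2.1,
       if x - i ≥ 0 ∧ y - i ≥ 0 then st.2.2.2 ++ [(x - i, y - i)] else st.2.2.2))
    ([], [], [], [])
  let moveList := [st.1, st.2.1, st.2.2.1, st.2.2.2]
  if horse then
    let im : List (Int × Int) := [(x, y + 1), (x, y - 1), (x + 1, y), (x - 1, y)]
    -- each 'try: im.remove(p) except: pass' = replace im by the removal result if it succeeds
    let im := if x = 8 then (PySem.List.remove? im (x + 1, y)).getD im else im
    let im := if y = 8 then (PySem.List.remove? im (x, y + 1)).getD im else im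
    let im := if x = 0 then (PySem.List.remove? im (x - 1, y)).getD im else im
    let im := if y = 0 then (PySem.List.remove? im (x, y - 1)).getD im else im
    moveList ++ [im]
  else moveList

-- ===== PORT B =====
-- ok(c, c0): '<9 if it grew past the center else >=0'
def bishopOk (c c0 : Int) : Bool := if c0 < c then decide (c < 9) else decide (0 ≤ c)

-- the loop body of B's sweep (state = (neg, pos))
def bishopStep (x y sy : Int) (st : List (Int × Int) × List (Int × Int)) (j : Int) :
    List (Int × Int) × List (Int × Int) :=
  if j = 0 then st
  else
    let p : Int × Int := (x + j, y + sy * j)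
    if bishopOk p.1 x && bishopOk p.2 y then
      if 0 < j then (st.1, st.2 ++ [p]) else (st.1 ++ [p], st.2)
    else st

-- one symmetric sweep j = -8..8 over a whole diagonal; returns (pos, neg[::-1])
def bishopDiagonal (x y sy : Int) : List (Int × Int) × List (Int × Int) :=
  let st := (PySem.List.pyRange (-8) 9 1).foldl (bishopStep x y sy) ([], [])
  (st.2, st.1.reverse)

def bishop_alt (x : Int) (y : Int) (horse : Bool) : List (List (Int × Int)) :=
  let d1 := bishopDiagonal x y 1        -- (leftback, rightfront)
  let d2 := bishopDiagonal x y (-1)     -- (leftfront, rightback)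
  let moveList := [d1.1, d2.2, d2.1, d1.2]
  if horse then
    let steps : List (Int × Int) := [(0, 1), (0, -1), (1, 0), (-1, 0)]
    moveList ++ [(steps.filter (fun s =>
        !((decide (s.1 = 1) && decide (x = 8)) || (decide (s.1 = -1) && decide (x = 0)) ||
          (decide (s.2 = 1) && decide (y = 8)) || (decide (s.2 = -1) && decide (y = 0))))).map
        (fun s => (x + s.1, y + s.2))]
  else moveList

-- ===== PRECONDITION & SPEC =====
def Spec_bishop (x : Int) (y : Int) (horse : Bool) (out : List (List (Int × Int))) : Prop := out = bishop_alt x y horse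
instance (x : Int) (y : Int) (horse : Bool) (out : List (List (Int × Int))) : Decidable (Spec_bishop x y horse out) := by unfold Spec_bishop; infer_instance

-- ===== CLAIM (what is proved, stated in full; the proofs are below) =====
def Claim_equal_bishop : Prop := ∀ (x : Int) (y : Int) (horse : Bool), Dom_bishop x y horse → Spec_bishop x y horse (bishop x y horse)

-- ===== LEMMAS AND PROOFS =====

-- A's 4-tuple fold of independent append-if loops splits into four filter+maps
theorem pvFoldl4 (l : List Int) (p1 p2 p3 p4 : Int → Prop)
    [DecidablePred p1] [DecidablePred p2] [DecidablePred p3] [DecidablePred p4]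
    (f1 f2 f3 f4 : Int → Int × Int) (a b c d : List (Int × Int)) :
    l.foldl (fun (st : List (Int × Int) × List (Int × Int) × List (Int × Int) × List (Int × Int)) i =>
      (if p1 i then st.1 ++ [f1 i] else st.1,
       if p2 i then st.2.1 ++ [f2 i] else st.2.1,
       if p3 i then st.2.2.1 ++ [f3 i] else st.2.2.1,
       if p4 i then st.2.2.2 ++ [f4 i] else st.2.2.2)) (a, b, c, d)
    = (a ++ (l.filter (fun i => decide (p1 i))).map f1,
       b ++ (l.filter (fun i => decide (p2 i))).map f2,
       c ++ (l.filter (fun i => decide (p3 i))).map f3,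
       d ++ (l.filter (fun i => decide (p4 i))).map f4) := by
  induction l generalizing a b c d with
  | nil => simp
  | cons h t ih =>
    simp only [List.foldl_cons, List.filter_cons]
    rw [ih]
    by_cases h1 : p1 h <;> by_cases h2 : p2 h <;> by_cases h3 : p3 h <;> by_cases h4 : p4 h <;>
      simp [h1, h2, h3, h4]

-- B's sweep over an all-negative prefix only grows the neg bucket
theorem pvFoldNeg (x y sy : Int) (l : List Int) (h : ∀ j ∈ l, j < 0) (a b : List (Int × Int)) :
    l.foldl (bishopStep x y sy) (a, b)
    = (a ++ (l.filter (fun j => bishopOk (x + j) x && bishopOk (y + sy * j) y)).map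
          (fun j => (x + j, y + sy * j)), b) := by
  induction l generalizing a with
  | nil => simp
  | cons j t ih =>
    have hj : j < 0 := h j (List.mem_cons_self ..)
    have ht : ∀ k ∈ t, k < 0 := fun k hk => h k (List.mem_cons_of_mem _ hk)
    simp only [List.foldl_cons, List.filter_cons, bishopStep,
      if_neg (show ¬ j = 0 by omega), if_neg (show ¬ 0 < j by omega)]
    by_cases hg : (bishopOk (x + j) x && bishopOk (y + sy * j) y) = true <;>
      simp [hg, ih ht, List.append_assoc]

-- B's sweep over an all-positive suffix only grows the pos bucket
theorem pvFoldPos (x y sy : Int) (l : List Int) (h : ∀ j ∈ l, 0 < j) (a b : List (Int × Int)) :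
    l.foldl (bishopStep x y sy) (a, b)
    = (a, b ++ (l.filter (fun j => bishopOk (x + j) x && bishopOk (y + sy * j) y)).map
          (fun j => (x + j, y + sy * j))) := by
  induction l generalizing b with
  | nil => simp
  | cons j t ih =>
    have hj : 0 < j := h j (List.mem_cons_self ..)
    have ht : ∀ k ∈ t, 0 < k := fun k hk => h k (List.mem_cons_of_mem _ hk)
    simp only [List.foldl_cons, List.filter_cons, bishopStep,
      if_neg (show ¬ j = 0 by omega), if_pos hj]
    by_cases hg : (bishopOk (x + j) x && bishopOk (y + sy * j) y) = true <;>
      simp [hg, ih ht, List.append_assoc]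

theorem pvStepZero (x y sy : Int) (st : List (Int × Int) × List (Int × Int)) :
    bishopStep x y sy st 0 = st := by
  simp [bishopStep]

theorem pvRangeSplit :
    PySem.List.pyRange (-8) 9 1
      = ([-8, -7, -6, -5, -4, -3, -2, -1] : List Int) ++ 0 :: PySem.List.pyRange 1 9 1 := by
  decide

-- B's diagonal, characterised as two outward filter+maps over the positive range
theorem pvDiagEq (x y sy : Int) :
    bishopDiagonal x y sy
    = (((PySem.List.pyRange 1 9 1).filter
          (fun j => bishopOk (x + j) x && bishopOk (y + sy * j) y)).map
          (fun j => (x + j, y + sy * j)),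
       ((PySem.List.pyRange 1 9 1).filter
          (fun j => bishopOk (x + -j) x && bishopOk (y + sy * -j) y)).map
          (fun j => (x + -j, y + sy * -j))) := by
  unfold bishopDiagonal
  rw [pvRangeSplit, List.foldl_append,
    pvFoldNeg x y sy ([-8, -7, -6, -5, -4, -3, -2, -1] : List Int) (by decide),
    List.foldl_cons, pvStepZero,
    pvFoldPos x y sy (PySem.List.pyRange 1 9 1) (by decide)]
  simp only [List.nil_append]
  refine Prod.ext rfl ?_
  -- reverse the negative half and re-index it by j ↦ -j over the positive range
  have hrev : ([-8, -7, -6, -5, -4, -3, -2, -1] : List Int).reverse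
      = (PySem.List.pyRange 1 9 1).map (fun j => -j) := by decide
  rw [← List.map_reverse, ← List.filter_reverse, hrev, List.filter_map, List.map_map]
  rfl

theorem pvOkGt (c c0 : Int) (h : c0 < c) : bishopOk c c0 = decide (c < 9) := by
  unfold bishopOk; rw [if_pos h]

theorem pvOkLe (c c0 : Int) (h : c ≤ c0) : bishopOk c c0 = decide (0 ≤ c) := by
  unfold bishopOk; rw [if_neg (by omega)]

theorem pvMemRange : ∀ j ∈ PySem.List.pyRange 1 9 1, 1 ≤ j ∧ j ≤ 8 := by decide

-- the horse block: A's conditional removals = B's edge-condition filter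
theorem pvHorseEq (x y : Int) :
    (let im : List (Int × Int) := [(x, y + 1), (x, y - 1), (x + 1, y), (x - 1, y)]
     let im := if x = 8 then (PySem.List.remove? im (x + 1, y)).getD im else im
     let im := if y = 8 then (PySem.List.remove? im (x, y + 1)).getD im else im
     let im := if x = 0 then (PySem.List.remove? im (x - 1, y)).getD im else im
     if y = 0 then (PySem.List.remove? im (x, y - 1)).getD im else im)
    = (([(0, 1), (0, -1), (1, 0), (-1, 0)] : List (Int × Int)).filter (fun s =>
        !((decide (s.1 = 1) && decide (x = 8)) || (decide (s.1 = -1) && decide (x = 0)) ||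
          (decide (s.2 = 1) && decide (y = 8)) || (decide (s.2 = -1) && decide (y = 0))))).map
        (fun s => (x + s.1, y + s.2)) := by
  by_cases hx8 : x = 8 <;> by_cases hy8 : y = 8 <;> by_cases hx0 : x = 0 <;> by_cases hy0 : y = 0 <;>
    simp_all [PySem.List.remove?_cons_of_ne, PySem.List.remove?_cons_self, Prod.mk.injEq,
      List.filter, List.map] <;> omega

-- ===== VERDICT (by name: the statement is the Claim_ definition above) =====
theorem bishop_spec : Claim_equal_bishop := by
  intro x y horse _
  unfold Spec_bishop bishop bishop_alt
  rw [pvFoldl4 (PySem.List.pyRange 1 9 1)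
      (fun i => x + i < 9 ∧ y + i < 9) (fun i => x - i ≥ 0 ∧ y + i < 9)
      (fun i => x + i < 9 ∧ y - i ≥ 0) (fun i => x - i ≥ 0 ∧ y - i ≥ 0)]
  rw [pvDiagEq x y 1, pvDiagEq x y (-1)]
  simp only [List.nil_append]
  have hfil_hlb : (PySem.List.pyRange 1 9 1).filter (fun j => bishopOk (x + j) x && bishopOk (y + 1 * j) y)
      = (PySem.List.pyRange 1 9 1).filter (fun i => decide (x + i < 9 ∧ y + i < 9)) :=
    List.filter_congr (fun j hj => by
      have := pvMemRange j hj
      rw [pvOkGt _ _ (by omega), pvOkGt _ _ (by omega), ← Bool.decide_and]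
      exact decide_eq_decide.mpr (by omega))
  have hlb : ((PySem.List.pyRange 1 9 1).filter (fun j => bishopOk (x + j) x && bishopOk (y + 1 * j) y)).map (fun j => (x + j, y + 1 * j))
      = ((PySem.List.pyRange 1 9 1).filter (fun i => decide (x + i < 9 ∧ y + i < 9))).map (fun i => (x + i, y + i)) := by
    rw [hfil_hlb]
    exact List.map_congr_left (fun j _ => by
      simp [Prod.mk.injEq] <;> omega)
  have hfil_hrb : (PySem.List.pyRange 1 9 1).filter (fun j => bishopOk (x + -j) x && bishopOk (y + -1 * -j) y)
      = (PySem.List.pyRange 1 9 1).filter (fun i => decide (x - i ≥ 0 ∧ y + i < 9)) :=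
    List.filter_congr (fun j hj => by
      have := pvMemRange j hj
      rw [pvOkLe _ _ (by omega), pvOkGt _ _ (by omega), ← Bool.decide_and]
      exact decide_eq_decide.mpr (by omega))
  have hrb : ((PySem.List.pyRange 1 9 1).filter (fun j => bishopOk (x + -j) x && bishopOk (y + -1 * -j) y)).map (fun j => (x + -j, y + -1 * -j))
      = ((PySem.List.pyRange 1 9 1).filter (fun i => decide (x - i ≥ 0 ∧ y + i < 9))).map (fun i => (x - i, y + i)) := by
    rw [hfil_hrb]
    exact List.map_congr_left (fun j _ => by
      simp [Prod.mk.injEq] <;> omega)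
  have hfil_hlf : (PySem.List.pyRange 1 9 1).filter (fun j => bishopOk (x + j) x && bishopOk (y + -1 * j) y)
      = (PySem.List.pyRange 1 9 1).filter (fun i => decide (x + i < 9 ∧ y - i ≥ 0)) :=
    List.filter_congr (fun j hj => by
      have := pvMemRange j hj
      rw [pvOkGt _ _ (by omega), pvOkLe _ _ (by omega), ← Bool.decide_and]
      exact decide_eq_decide.mpr (by omega))
  have hlf : ((PySem.List.pyRange 1 9 1).filter (fun j => bishopOk (x + j) x && bishopOk (y + -1 * j) y)).map (fun j => (x + j, y + -1 * j))
      = ((PySem.List.pyRange 1 9 1).filter (fun i => decide (x + i < 9 ∧ y - i ≥ 0))).map (fun i => (x + i, y - i)) := by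
    rw [hfil_hlf]
    exact List.map_congr_left (fun j _ => by
      simp [Prod.mk.injEq] <;> omega)
  have hfil_hrf : (PySem.List.pyRange 1 9 1).filter (fun j => bishopOk (x + -j) x && bishopOk (y + 1 * -j) y)
      = (PySem.List.pyRange 1 9 1).filter (fun i => decide (x - i ≥ 0 ∧ y - i ≥ 0)) :=
    List.filter_congr (fun j hj => by
      have := pvMemRange j hj
      rw [pvOkLe _ _ (by omega), pvOkLe _ _ (by omega), ← Bool.decide_and]
      exact decide_eq_decide.mpr (by omega))
  have hrf : ((PySem.List.pyRange 1 9 1).filter (fun j => bishopOk (x + -j) x && bishopOk (y + 1 * -j) y)).map (fun j => (x + -j, y + 1 * -j))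
      = ((PySem.List.pyRange 1 9 1).filter (fun i => decide (x - i ≥ 0 ∧ y - i ≥ 0))).map (fun i => (x - i, y - i)) := by
    rw [hfil_hrf]
    exact List.map_congr_left (fun j _ => by
      simp [Prod.mk.injEq] <;> omega)
  cases horse with
  | false => simp only [Bool.false_eq_true, if_false]; rw [hlb, hrb, hlf, hrf]
  | true =>
    simp only [if_true]
    rw [hlb, hrb, hlf, hrf, pvHorseEq x y]
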